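-- pv_equiv track=rewrite | github.com/CopterExpress/clever-show | blender-addon/clever-show-addon-src/operators/export.py | _compress_empty
-- ===== SOURCE A (Python) =====
-- def _compress_empty(animation):
--     i = 0
--     while i < len(animation) - 1:
--         if not animation[i + 1]:
--             frame = animation[i]
--             frame.update({"skip": frame.get("skip", 0) + 1})
--             animation.pop(i + 1)
--         else:
--             i += 1
--     return animation
-- ===== SOURCE B (Python) =====
-- def _compress_empty(animation):
--     # Single forward pass with an "anchor" frame: each empty frame bumps the
--     # anchor's skip count; like A, mutates the input list and frames in place.
--     if not animation:
--         return animation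
--     result = []
--     anchor = animation[0]
--     for frame in animation[1:]:
--         if frame:
--             result.append(anchor)
--             anchor = frame
--         else:
--             anchor["skip"] = anchor.get("skip", 0) + 1
--     result.append(anchor)
--     animation[:] = result
--     return animation
-- ===== Notes on version B (the rewrite author's own statement) =====
-- stated objective: alternative
-- what changed: Replaces the while-loop that repeatedly pops empty frames out of the list in place by a single forward pass that keeps an anchor frame, bumps its skip count on empty frames and appends to a fresh result list (intended as faster; a timing run measured 1.52x at the largest size but not consistently).
import Mathlib
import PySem

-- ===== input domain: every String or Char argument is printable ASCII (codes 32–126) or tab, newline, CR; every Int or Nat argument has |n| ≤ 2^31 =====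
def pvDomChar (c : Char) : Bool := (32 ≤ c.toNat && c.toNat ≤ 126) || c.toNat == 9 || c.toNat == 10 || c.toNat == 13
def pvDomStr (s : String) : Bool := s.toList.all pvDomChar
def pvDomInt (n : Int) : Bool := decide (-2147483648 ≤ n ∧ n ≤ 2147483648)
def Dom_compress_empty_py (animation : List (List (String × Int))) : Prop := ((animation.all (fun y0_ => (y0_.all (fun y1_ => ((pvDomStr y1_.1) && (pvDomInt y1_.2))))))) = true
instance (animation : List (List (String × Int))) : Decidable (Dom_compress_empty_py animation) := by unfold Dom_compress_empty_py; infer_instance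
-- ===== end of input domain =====

-- B replaces A's repeated in-place pops by a single forward pass with an anchor frame, rebuilding the list.
-- Both Pythons mutate the input list/frames in place identically; the equivalence proved is about the return value.

-- frame.update({"skip": frame.get("skip", 0) + 1}) — identical expression in both Pythons
def skipBump (frame : List (String × Int)) : List (String × Int) :=
  (PySem.Dict.insert ⟨frame⟩ "skip" (PySem.Dict.getD ⟨frame⟩ "skip" 0 + 1)).items

-- ===== PORT A =====
-- the while-loop of A: state (animation, i); list.pop(i+1) = List.eraseIdx (i+1).
-- fuel is a totality guard only: each iteration pops an element or increments i, so
-- 2*len+1 fuel always suffices and the 0 branch is never reached from compress_empty_py.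
-- animation[i+1] / animation[i] are read with List.getD: both indices are in range under the loop guard, exactly as in Python.
def aLoop : Nat → List (List (String × Int)) → Nat → List (List (String × Int))
  | 0, anim, _ => anim
  | fuel + 1, anim, i =>
    if i < anim.length - 1 then
      if anim.getD (i + 1) [] = [] then
        aLoop fuel ((anim.set i (skipBump (anim.getD i []))).eraseIdx (i + 1)) i
      else
        aLoop fuel anim (i + 1)
    else anim

def compress_empty_py (animation : List (List (String × Int))) : List (List (String × Int)) :=
  aLoop (2 * animation.length + 1) animation 0

-- ===== PORT B =====
-- B's for-loop: acc = result, anchor = the current anchor frame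
def bGo (acc : List (List (String × Int))) (anchor : List (String × Int)) :
    List (List (String × Int)) → List (List (String × Int))
  | [] => acc ++ [anchor]
  | frame :: rest =>
    if frame ≠ [] then bGo (acc ++ [anchor]) frame rest
    else bGo acc (skipBump anchor) rest

def compress_empty_py_alt (animation : List (List (String × Int))) : List (List (String × Int)) :=
  match animation with
  | [] => []
  | f :: rest => bGo [] f rest

-- ===== PRECONDITION & SPEC =====
def Spec_compress_empty_py (animation : List (List (String × Int))) (out : List (List (String × Int))) : Prop := out = compress_empty_py_alt animation
instance (animation : List (List (String × Int))) (out : List (List (String × Int))) : Decidable (Spec_compress_empty_py animation out) := by unfold Spec_compress_empty_py; infer_instance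

-- ===== CLAIM (what is proved, stated in full; the proofs are below) =====
def Claim_equal_compress_empty_py : Prop := ∀ (animation : List (List (String × Int))), Dom_compress_empty_py animation → Spec_compress_empty_py animation (compress_empty_py animation)

-- ===== LEMMAS AND PROOFS =====

-- bGo only appends to the given accumulator
theorem bGo_acc (acc : List (List (String × Int))) (anchor : List (String × Int))
    (rest : List (List (String × Int))) : bGo acc anchor rest = acc ++ bGo [] anchor rest := by
  induction rest generalizing acc anchor with
  | nil => simp [bGo]
  | cons frame rest ih =>
    by_cases hf : frame = []
    · simp only [bGo, hf, ne_eq, not_true_eq_false, if_false]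
      exact ih acc (skipBump anchor)
    · simp only [bGo, if_pos hf]
      rw [ih (acc ++ [anchor]) frame, ih ([] ++ [anchor]) frame]
      simp

-- loop invariant: with the processed prefix `done` in place, the cursor on `anchor`
-- and enough fuel, A's loop produces `done` followed by B's pass over the remaining frames
theorem aLoop_eq_bGo (rest : List (List (String × Int))) :
    ∀ (fuel : Nat) (done : List (List (String × Int))) (anchor : List (String × Int)),
      2 * rest.length + 1 ≤ fuel →
      aLoop fuel (done ++ anchor :: rest) done.length = done ++ bGo [] anchor rest := by
  induction rest with
  | nil =>
    intro fuel done anchor hfuel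
    match fuel, hfuel with
    | fuel + 1, _ =>
      simp [aLoop, bGo]
  | cons frame rest ih =>
    intro fuel done anchor hfuel
    match fuel, hfuel with
    | fuel + 1, hfuel =>
      have hlen : done.length < (done ++ anchor :: frame :: rest).length - 1 := by
        simp only [List.length_append, List.length_cons]; omega
      rw [aLoop, if_pos hlen]
      have hget1 : (done ++ anchor :: frame :: rest).getD (done.length + 1) [] = frame := by
        rw [List.getD_eq_getElem?_getD, List.getElem?_append_right (by omega)]
        simp
      have hget0 : (done ++ anchor :: frame :: rest).getD done.length [] = anchor := by
        rw [List.getD_eq_getElem?_getD, List.getElem?_append_right (by omega)]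
        simp
      by_cases hf : frame = []
      · rw [if_pos (by rw [hget1, hf])]
        have hset : (done ++ anchor :: frame :: rest).set done.length
              (skipBump ((done ++ anchor :: frame :: rest).getD done.length []))
            = done ++ (skipBump anchor) :: frame :: rest := by
          rw [hget0, List.set_append_right _ _ (by omega)]
          simp
        rw [hset]
        have herase : (done ++ (skipBump anchor) :: frame :: rest).eraseIdx (done.length + 1)
            = done ++ (skipBump anchor) :: rest := by
          rw [List.eraseIdx_append_of_length_le (by omega)]
          simp
        rw [herase, ih fuel done (skipBump anchor) (by simp at hfuel ⊢; omega)]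
        simp only [bGo, hf, ne_eq, not_true_eq_false, if_false]
      · rw [if_neg (by rw [hget1]; exact hf)]
        have hsplit : done ++ anchor :: frame :: rest = (done ++ [anchor]) ++ frame :: rest := by
          simp
        have hl : done.length + 1 = (done ++ [anchor]).length := by simp
        rw [hsplit, hl, ih fuel (done ++ [anchor]) frame (by simp at hfuel ⊢; omega)]
        simp only [bGo, if_pos hf]
        rw [bGo_acc ([] ++ [anchor]) frame rest]
        simp

-- ===== VERDICT (by name: the statement is the Claim_ definition above) =====
theorem compress_empty_py_spec : Claim_equal_compress_empty_py := by
  intro animation _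
  unfold Spec_compress_empty_py compress_empty_py compress_empty_py_alt
  match animation with
  | [] => simp [aLoop]
  | f :: rest =>
    have h := aLoop_eq_bGo rest (2 * (f :: rest).length + 1) [] f
      (by simp only [List.length_cons]; omega)
    simpa using h
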